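-- pv_equiv track=rewrite | github.com/paiv/aoc2017 | code/09-1-stream_garbage/solve.py | solve
-- ===== SOURCE A (Python) =====
-- def solve(problem):
--     res = 0
--     level = 0
--     state = 0
--
--     for c in problem:
--
--         if state == 0:
--
--             if c == '<':
--                 state = 1
--
--             elif c == '{':
--                 level += 1
--                 res += level
--
--             elif c == '}':
--                 level -= 1
--
--         elif state == 1:
--
--             if c == '>':
--                 state = 0
--
--             elif c == '!':
--                 state = 2
--
--         elif state == 2:
--
--             state = 1
--
--
--     return res
-- ===== SOURCE B (Python) =====
-- def solve(problem):
--     n = len(problem)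
--     i = 0
--     res = 0
--     level = 0
--     while i < n:
--         c = problem[i]
--         if c == '{':
--             level += 1
--             res += level
--             i += 1
--         elif c == '}':
--             level -= 1
--             i += 1
--         elif c == '<':
--             i += 1
--             while i < n and problem[i] != '>':
--                 if problem[i] == '!':
--                     i += 2
--                 else:
--                     i += 1
--             i += 1
--         else:
--             i += 1
--     return res
-- ===== Notes on version B (the rewrite author's own statement) =====
-- stated objective: alternative
-- what changed: Replaced A's explicit three-state machine over every character with an index-driven while-loop that consumes garbage in a nested inner loop and handles cancellation by an explicit two-position index jump.
import Mathlib
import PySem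

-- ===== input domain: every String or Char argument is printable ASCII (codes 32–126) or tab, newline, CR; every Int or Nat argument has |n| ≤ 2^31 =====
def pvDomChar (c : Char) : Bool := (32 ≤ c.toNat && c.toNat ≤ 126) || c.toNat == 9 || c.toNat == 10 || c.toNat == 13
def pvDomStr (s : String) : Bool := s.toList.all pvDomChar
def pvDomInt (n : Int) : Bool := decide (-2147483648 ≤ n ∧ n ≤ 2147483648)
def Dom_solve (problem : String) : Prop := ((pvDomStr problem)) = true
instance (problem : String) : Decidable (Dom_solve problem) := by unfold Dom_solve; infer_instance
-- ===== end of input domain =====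

-- B replaces A's explicit three-state machine by an index-driven loop with a nested
-- garbage-consuming inner loop and explicit index jumps for cancellation (objective: alternative).

-- ===== PORT A =====
-- one step of A's for-loop: state (res, level, state)
def solveStep (st : Int × Int × Nat) (c : Char) : Int × Int × Nat :=
  let (res, level, state) := st
  if state = 0 then
    if c = '<' then (res, level, 1)
    else if c = '{' then (res + (level + 1), level + 1, 0)
    else if c = '}' then (res, level - 1, 0)
    else (res, level, 0)
  else if state = 1 then
    if c = '>' then (res, level, 0)
    else if c = '!' then (res, level, 2)
    else (res, level, 1)
  else (res, level, 1)

def solve (problem : String) : Int :=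
  (problem.toList.foldl solveStep (0, 0, 0)).1

-- ===== PORT B =====
-- inner while loop: advance i until the closing bracket or end; a cancellation skips an extra character; returns the index
def solveAltGarb (cs : List Char) (n i : Nat) : Nat :=
  if i < n then
    if cs.getD i ' ' = '>' then i
    else if cs.getD i ' ' = '!' then solveAltGarb cs n (i + 2)
    else solveAltGarb cs n (i + 1)
  else i
termination_by n - i
decreasing_by all_goals omega

-- the inner loop never moves the index backwards (cited by solveAltLoop's termination proof)
theorem solveAltGarb_ge (cs : List Char) (n i : Nat) : i ≤ solveAltGarb cs n i := by
  fun_induction solveAltGarb cs n i <;> omega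

-- outer while loop
def solveAltLoop (cs : List Char) (n i : Nat) (res level : Int) : Int :=
  if _h : i < n then
    let c := cs.getD i ' '
    if c = '{' then solveAltLoop cs n (i + 1) (res + (level + 1)) (level + 1)
    else if c = '}' then solveAltLoop cs n (i + 1) res (level - 1)
    else if c = '<' then solveAltLoop cs n (solveAltGarb cs n (i + 1) + 1) res level
    else solveAltLoop cs n (i + 1) res level
  else res
termination_by n - i
decreasing_by
  · omega
  · omega
  · have := solveAltGarb_ge cs n (i + 1); omega
  · omega

def solve_alt (problem : String) : Int :=
  let cs := problem.toList
  solveAltLoop cs cs.length 0 0 0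

-- ===== PRECONDITION & SPEC =====
def Spec_solve (problem : String) (out : Int) : Prop := out = solve_alt problem
instance (problem : String) (out : Int) : Decidable (Spec_solve problem out) := by unfold Spec_solve; infer_instance

-- ===== CLAIM (what is proved, stated in full; the proofs are below) =====
def Claim_equal_solve : Prop := ∀ (problem : String), Dom_solve problem → Spec_solve problem (solve problem)

-- ===== LEMMAS AND PROOFS =====

-- Main invariant: from any index i, A's state machine run over the remaining characters
-- computes the same result as B's loops, in state 0 (outer loop) and state 1 (garbage loop).
theorem solve_loop_eq (cs : List Char) (k : Nat) :
    ∀ i res level, cs.length - i ≤ k →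
      ((((cs.drop i).foldl solveStep (res, level, 0)).1 = solveAltLoop cs cs.length i res level)
      ∧ (((cs.drop i).foldl solveStep (res, level, 1)).1
          = solveAltLoop cs cs.length (solveAltGarb cs cs.length i + 1) res level)) := by
  induction k with
  | zero =>
    intro i res level hk
    have hni : ¬ i < cs.length := by omega
    have hgarb : solveAltGarb cs cs.length i = i := by rw [solveAltGarb]; rw [if_neg hni]
    have hd : cs.drop i = [] := List.drop_eq_nil_of_le (by omega)
    constructor
    · rw [hd, solveAltLoop, dif_neg hni]; rfl
    · rw [hd, hgarb, solveAltLoop, dif_neg (by omega : ¬ i + 1 < cs.length)]; rfl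
  | succ k ih =>
    intro i res level hk
    by_cases h : i < cs.length
    case neg => exact ih i res level (by omega)
    have hdrop : cs.drop i = cs[i] :: cs.drop (i + 1) := List.drop_eq_getElem_cons h
    have hgetD : cs.getD i ' ' = cs[i] := List.getD_eq_getElem _ _ h
    constructor
    · rw [hdrop, List.foldl_cons, solveAltLoop, dif_pos h]
      simp only [hgetD]
      by_cases h1 : cs[i] = '<'
      · simp [solveStep, h1]
        exact (ih (i + 1) res level (by omega)).2
      · by_cases h2 : cs[i] = '{'
        · simp [solveStep, h2]
          exact (ih (i + 1) (res + (level + 1)) (level + 1) (by omega)).1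
        · by_cases h3 : cs[i] = '}'
          · simp [solveStep, h3]
            exact (ih (i + 1) res (level - 1) (by omega)).1
          · simp [solveStep, h1, h2, h3]
            exact (ih (i + 1) res level (by omega)).1
    · rw [hdrop, List.foldl_cons]
      by_cases h1 : cs[i] = '>'
      · have hg : solveAltGarb cs cs.length i = i := by
          rw [solveAltGarb, if_pos h, hgetD, if_pos h1]
        rw [hg]
        simp [solveStep, h1]
        exact (ih (i + 1) res level (by omega)).1
      · by_cases h2 : cs[i] = '!'
        · have hg : solveAltGarb cs cs.length i = solveAltGarb cs cs.length (i + 2) := by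
            rw [solveAltGarb, if_pos h, hgetD, if_neg h1, if_pos h2]
          rw [hg]
          simp [solveStep, h2]
          by_cases h3 : i + 1 < cs.length
          · have hdrop2 : cs.drop (i + 1) = cs[i + 1] :: cs.drop (i + 2) :=
              List.drop_eq_getElem_cons h3
            rw [hdrop2, List.foldl_cons]
            have hstep : solveStep (res, level, 2) cs[i + 1] = (res, level, 1) := by
              simp [solveStep]
            rw [hstep]
            exact (ih (i + 2) res level (by omega)).2
          · have hd : cs.drop (i + 1) = [] := List.drop_eq_nil_of_le (by omega)
            have hg2 : solveAltGarb cs cs.length (i + 2) = i + 2 := by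
              rw [solveAltGarb, if_neg (by omega : ¬ i + 2 < cs.length)]
            rw [hd, hg2, solveAltLoop, dif_neg (by omega : ¬ i + 2 + 1 < cs.length)]
            rfl
        · have hg : solveAltGarb cs cs.length i = solveAltGarb cs cs.length (i + 1) := by
            rw [solveAltGarb, if_pos h, hgetD, if_neg h1, if_neg h2]
          rw [hg]
          simp [solveStep, h1, h2]
          exact (ih (i + 1) res level (by omega)).2

-- ===== VERDICT (by name: the statement is the Claim_ definition above) =====
theorem solve_spec : Claim_equal_solve := by
  intro p _
  unfold Spec_solve solve solve_alt
  have := (solve_loop_eq p.toList p.toList.length 0 0 0 (by omega)).1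
  simpa using this
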